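-- pv_equiv track=rewrite | github.com/lancelote/leetcode | src/cyclically_rotating_a_grid.py | layers_from
-- ===== SOURCE A (Python) =====
-- from collections.abc import Iterator
-- from typing import Tuple
--
-- Grid = list[list[int]]
--
-- Layer = list[int]
--
-- Coordinates = Tuple[int, int]
--
-- def layer_coordinates(
--     layer_id: int, width: int, height: int
-- ) -> Iterator[Coordinates]:
--     x = layer_id
--     y = layer_id
--
--     for x in range(layer_id, width - layer_id):
--         yield x, y
--
--     for y in range(layer_id + 1, height - layer_id):
--         yield x, y
--
--     for x in range(width - layer_id - 2, layer_id - 1, -1):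
--         yield x, y
--
--     for y in range(height - layer_id - 2, layer_id, -1):
--         yield x, y
--
-- def layers_from(grid: Grid) -> Iterator[Layer]:
--     grid_width = len(grid[0])
--     grid_height = len(grid)
--     total_layers = min(grid_width, grid_height) // 2
--
--     for layer_id in range(total_layers):
--         layer = [
--             grid[y][x]
--             for x, y in layer_coordinates(layer_id, grid_width, grid_height)
--         ]
--         yield layer
-- ===== SOURCE B (Python) =====
-- def layers_from(grid):
--     if len(grid) < 2 or len(grid[0]) < 2:
--         return
--     w, h = len(grid[0]), len(grid)
--     yield (grid[0][:w]
--            + [grid[y][w - 1] for y in range(1, h)]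
--            + grid[h - 1][:w - 1][::-1]
--            + [grid[y][0] for y in range(h - 2, 0, -1)])
--     yield from layers_from([row[1:w - 1] for row in grid[1:h - 1]])
-- ===== Notes on version B (the rewrite author's own statement) =====
-- stated objective: alternative
-- what changed: Replaced the indexed loop over layer ids with coordinate arithmetic (a generator of (x,y) pairs per layer) by structural recursion: peel the outermost ring of the whole grid with trivial indices, then recurse on the inner subgrid obtained by stripping the first/last row and column.
import Mathlib
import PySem

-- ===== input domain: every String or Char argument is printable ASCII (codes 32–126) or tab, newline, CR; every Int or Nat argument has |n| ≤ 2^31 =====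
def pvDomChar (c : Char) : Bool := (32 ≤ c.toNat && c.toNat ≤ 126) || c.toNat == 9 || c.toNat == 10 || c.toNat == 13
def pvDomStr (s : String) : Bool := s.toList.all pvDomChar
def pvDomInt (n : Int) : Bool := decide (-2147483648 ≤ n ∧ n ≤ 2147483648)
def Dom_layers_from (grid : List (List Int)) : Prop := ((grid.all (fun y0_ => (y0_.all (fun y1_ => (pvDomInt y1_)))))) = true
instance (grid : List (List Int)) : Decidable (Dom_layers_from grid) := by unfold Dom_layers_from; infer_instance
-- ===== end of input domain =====

-- B peels the outermost ring of the whole grid and recurses on the inner subgrid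
-- (strip first/last row and column), replacing A's indexed loop over layer ids with
-- coordinate arithmetic; proved equal on Pre_ (the inputs where Python A returns).


-- ===== PORT A =====
-- layer_coordinates: the four 'for' loops thread the leftover loop variables x,y exactly as Python does
-- (each foldl carries the growing list and the current loop variable).
def layer_coordinates (layer_id width height : Int) : List (Int × Int) :=
  let x := layer_id
  let y := layer_id
  let s1 := (PySem.List.pyRange layer_id (width - layer_id) 1).foldl
      (fun (p : List (Int × Int) × Int) xv => (p.1 ++ [(xv, y)], xv)) ([], x)
  let x := s1.2
  let s2 := (PySem.List.pyRange (layer_id + 1) (height - layer_id) 1).foldl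
      (fun (p : List (Int × Int) × Int) yv => (p.1 ++ [(x, yv)], yv)) (s1.1, y)
  let y := s2.2
  let s3 := (PySem.List.pyRange (width - layer_id - 2) (layer_id - 1) (-1)).foldl
      (fun (p : List (Int × Int) × Int) xv => (p.1 ++ [(xv, y)], xv)) (s2.1, x)
  let x := s3.2
  let s4 := (PySem.List.pyRange (height - layer_id - 2) layer_id (-1)).foldl
      (fun (p : List (Int × Int) × Int) yv => (p.1 ++ [(x, yv)], yv)) (s3.1, y)
  s4.1

def layers_from (grid : List (List Int)) : List (List Int) :=
  let grid_width : Int := (PySem.List.pyGetD grid 0 []).length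
  let grid_height : Int := grid.length
  let total_layers : Int := PySem.Int.floordiv (min grid_width grid_height) 2
  (PySem.List.pyRange 0 total_layers 1).map (fun layer_id =>
    (layer_coordinates layer_id grid_width grid_height).map
      (fun xy => PySem.List.pyGetD (PySem.List.pyGetD grid xy.2 []) xy.1 0))

-- ===== PORT B =====
-- termination helper: the inner subgrid (rows 1..h-2) is strictly shorter
theorem pv_inner_len_lt (grid : List (List Int)) (h2 : 2 ≤ grid.length) :
    (PySem.List.slice grid (some 1) (some ((grid.length : Int) - 1))).length < grid.length := by
  have h1 : ((grid.length : Int) - 1) = (((grid.length - 1 : Nat)) : Int) := by omega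
  rw [h1]
  have h0 : ((1 : Int)) = (((1 : Nat)) : Int) := rfl
  rw [h0, PySem.List.slice_natCast]
  simp only [List.length_take, List.length_drop]
  omega

def layers_from_alt (grid : List (List Int)) : List (List Int) :=
  if hg : grid.length < 2 ∨ (PySem.List.pyGetD grid 0 []).length < 2 then []
  else
    let w : Int := (PySem.List.pyGetD grid 0 []).length
    let h : Int := grid.length
    (PySem.List.slice (PySem.List.pyGetD grid 0 []) none (some w)
      ++ (PySem.List.pyRange 1 h 1).map (fun y => PySem.List.pyGetD (PySem.List.pyGetD grid y []) (w - 1) 0)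
      ++ (PySem.List.slice (PySem.List.pyGetD grid (h - 1) []) none (some (w - 1))).reverse
      ++ (PySem.List.pyRange (h - 2) 0 (-1)).map (fun y => PySem.List.pyGetD (PySem.List.pyGetD grid y []) 0 0))
    :: layers_from_alt ((PySem.List.slice grid (some 1) (some (h - 1))).map
        (fun row => PySem.List.slice row (some 1) (some (w - 1))))
termination_by grid.length
decreasing_by
  simp only [List.length_map]
  exact pv_inner_len_lt grid (by omega)

-- ===== PRECONDITION & SPEC =====
-- Pre_ excludes exactly the inputs on which Python A raises IndexError: the empty grid (grid[0]),
-- and grids with at least one ring to visit but some row shorter than len(grid[0]).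
def Pre_layers_from (grid : List (List Int)) : Prop :=
  grid ≠ [] ∧
    (PySem.Int.floordiv (min ((PySem.List.pyGetD grid 0 []).length : Int) (grid.length : Int)) 2 = 0 ∨
      ∀ row ∈ grid, (PySem.List.pyGetD grid 0 []).length ≤ row.length)
instance (grid : List (List Int)) : Decidable (Pre_layers_from grid) := by
  unfold Pre_layers_from; infer_instance

def pvWitness_layers_from : List (List Int) := [[1, 2], [3, 4]]

def Spec_layers_from (grid : List (List Int)) (out : List (List Int)) : Prop := out = layers_from_alt grid
instance (grid : List (List Int)) (out : List (List Int)) : Decidable (Spec_layers_from grid out) := by unfold Spec_layers_from; infer_instance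

-- ===== CLAIM (what is proved, stated in full; the proofs are below) =====
def Claim_equal_layers_from : Prop := ∀ (grid : List (List Int)), Dom_layers_from grid → Pre_layers_from grid → Spec_layers_from grid (layers_from grid)

-- ===== LEMMAS AND PROOFS =====

-- abbreviations for the proofs: width, height, number of layers, the ring of layer l in slice
-- form, and the inner subgrid B recurses on
def pvW (g : List (List Int)) : Int := ((PySem.List.pyGetD g 0 []).length : Int)
def pvH (g : List (List Int)) : Int := (g.length : Int)
def pvT (g : List (List Int)) : Nat := min (PySem.List.pyGetD g 0 []).length g.length / 2
def pvRing (g : List (List Int)) (l : Int) : List Int :=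
  PySem.List.slice (PySem.List.pyGetD g l []) (some l) (some (pvW g - l))
  ++ (PySem.List.pyRange (l + 1) (pvH g - l) 1).map
      (fun y => PySem.List.pyGetD (PySem.List.pyGetD g y []) (pvW g - l - 1) 0)
  ++ (PySem.List.slice (PySem.List.pyGetD g (pvH g - l - 1) []) (some l) (some (pvW g - l - 1))).reverse
  ++ (PySem.List.pyRange (pvH g - l - 2) l (-1)).map
      (fun y => PySem.List.pyGetD (PySem.List.pyGetD g y []) l 0)
def pvInner (g : List (List Int)) : List (List Int) :=
  (PySem.List.slice g (some 1) (some (pvH g - 1))).map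
    (fun row => PySem.List.slice row (some 1) (some (pvW g - 1)))

-- the foldl of 'for v in r: yield f v' appends the mapped range and threads the last loop variable
theorem foldl_track {α : Type} (f : Int → α) (xs : List Int) (acc : List α) (x0 : Int) :
    xs.foldl (fun (p : List α × Int) v => (p.1 ++ [f v], v)) (acc, x0)
      = (acc ++ xs.map f, xs.getLastD x0) := by
  induction xs generalizing acc x0 with
  | nil => simp
  | cons v vs ih =>
    simp only [List.foldl_cons, ih, List.map_cons, List.append_assoc, List.singleton_append]
    cases vs with
    | nil => rfl
    | cons a t => exact congrArg _ (Eq.symm List.getLastD_cons)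

theorem pyRange_getLastD (a b x0 : Int) :
    (PySem.List.pyRange a b 1).getLastD x0 = if a < b then b - 1 else x0 := by
  rw [PySem.List.pyRange_of_pos a b (by norm_num)]
  split_ifs with h
  · have hn : ((b - a + 1 - 1) / 1).toNat = (b - a).toNat := by omega
    rw [hn]
    obtain ⟨m, hm⟩ : ∃ m, (b - a).toNat = m + 1 := ⟨(b - a).toNat - 1, by omega⟩
    rw [hm, List.range_succ, List.map_append]
    simp
    omega
  · simp

theorem pyRange_down (a b : Int) :
    PySem.List.pyRange (b - 1) (a - 1) (-1) = (PySem.List.pyRange a b 1).reverse := by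
  rw [PySem.List.pyRange_of_pos a b (by norm_num)]
  simp only [PySem.List.pyRange]
  by_cases h : a < b
  · have h3 : (a - 1 < b - 1) := by omega
    norm_num [h3, h]
    apply List.ext_getElem
    · simp
    · intro i h1 h2
      simp only [List.getElem_map, List.getElem_range, List.getElem_reverse, List.length_map,
        List.length_range]
      simp only [List.length_map, List.length_range] at h1
      have hi : i < (b - a).toNat := h1
      omega
  · have h3 : ¬(a - 1 < b - 1) := by omega
    norm_num [h3, h]

theorem pyRange_neg_one (a b : Int) :
    PySem.List.pyRange a b (-1) = (PySem.List.pyRange (b + 1) (a + 1) 1).reverse := by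
  have h := pyRange_down (b + 1) (a + 1)
  norm_num at h
  exact h

theorem pyRange_getLastD_neg (a b x0 : Int) :
    (PySem.List.pyRange a b (-1)).getLastD x0 = if b < a then b + 1 else x0 := by
  rw [pyRange_neg_one]
  by_cases h : b < a
  · rw [if_pos h, PySem.List.pyRange_one_cons (by omega : b + 1 < a + 1), List.reverse_cons]
    exact List.getLastD_concat
  · rw [if_neg h, PySem.List.pyRange_of_pos _ _ (by norm_num : (0:Int) < 1),
      if_neg (by omega : ¬(b + 1 < a + 1))]
    simp

theorem pyRange_shift (a b : Int) :
    PySem.List.pyRange (a + 1) (b + 1) 1 = (PySem.List.pyRange a b 1).map (· + 1) := by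
  rw [PySem.List.pyRange_one, PySem.List.pyRange_one, List.map_map]
  have h : (b + 1 - (a + 1)) = b - a := by ring
  rw [h]
  apply List.map_congr_left
  intro k _
  simp only [Function.comp_apply]
  ring

theorem sliceRange (xs : List Int) (a b : Int) (h0 : 0 ≤ a) (hab : a ≤ b) (hb : b ≤ (xs.length : Int)) :
    (PySem.List.pyRange a b 1).map (fun x => PySem.List.pyGetD xs x 0)
      = PySem.List.slice xs (some a) (some b) := by
  have hca : PySem.List.clampIdx xs.length a = a.toNat := by
    simp only [PySem.List.clampIdx]; split_ifs <;> omega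
  have hcb : PySem.List.clampIdx xs.length b = b.toNat := by
    simp only [PySem.List.clampIdx]; split_ifs <;> omega
  simp only [PySem.List.slice, hca, hcb]
  rw [PySem.List.pyRange_of_pos a b (by norm_num)]
  by_cases h : a < b
  · rw [if_pos h]
    have hc : ((b - a + 1 - 1) / 1).toNat = (b - a).toNat := by omega
    rw [hc]
    apply List.ext_getElem
    · simp; omega
    · intro i h1 h2
      simp only [List.getElem_map, List.getElem_range, List.getElem_take, List.getElem_drop]
      simp only [List.length_map, List.length_range] at h1
      rw [PySem.List.pyGetD_eq_getElem xs 0 (by omega) (by omega)]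
      congr 1
      omega
  · rw [if_neg h]
    have : b.toNat - a.toNat = 0 := by omega
    simp [this]

-- A's ring for layer l equals the slice form pvRing
theorem layer_eq (grid : List (List Int)) (l : Int)
    (hl : 0 ≤ l)
    (hlW : 2 * l + 2 ≤ pvW grid)
    (hlH : 2 * l + 2 ≤ pvH grid)
    (hrow : ∀ row ∈ grid, (PySem.List.pyGetD grid 0 []).length ≤ row.length) :
    (layer_coordinates l (pvW grid) (pvH grid)).map
        (fun xy => PySem.List.pyGetD (PySem.List.pyGetD grid xy.2 []) xy.1 0)
      = pvRing grid l := by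
  unfold pvW at hlW
  unfold pvH at hlH
  unfold pvW pvH pvRing
  set W : Int := ((PySem.List.pyGetD grid 0 []).length : Int) with hWdef
  set H : Int := ((grid.length : Int)) with hHdef
  have hrowlen : ∀ (j : Int), 0 ≤ j → j < H → W ≤ ((PySem.List.pyGetD grid j []).length : Int) := by
    intro j hj0 hjH
    rw [PySem.List.pyGetD_eq_getElem grid [] hj0 (by exact_mod_cast hjH), hWdef]
    exact_mod_cast hrow _ (List.getElem_mem _)
  -- unfold the coordinate generator
  simp only [layer_coordinates, foldl_track, pyRange_getLastD, pyRange_getLastD_neg]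
  rw [if_pos (by omega : l < W - l), if_pos (by omega : l + 1 < H - l),
    if_pos (by omega : l - 1 < W - l - 2)]
  rw [show (l - 1 + 1 : Int) = l from by ring]
  simp only [List.nil_append, List.map_append, List.map_map]
  -- four segments
  have htop : (PySem.List.pyRange l (W - l) 1).map
      ((fun xy => PySem.List.pyGetD (PySem.List.pyGetD grid xy.2 []) xy.1 0) ∘ (fun xv => (xv, l)))
      = PySem.List.slice (PySem.List.pyGetD grid l []) (some l) (some (W - l)) := by
    rw [show ((fun xy => PySem.List.pyGetD (PySem.List.pyGetD grid xy.2 []) xy.1 0) ∘ (fun xv => (xv, l)))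
        = fun x => PySem.List.pyGetD (PySem.List.pyGetD grid l []) x 0 from rfl]
    exact sliceRange _ l (W - l) hl (by omega) (le_trans (by omega) (hrowlen l hl (by omega)))
  have hbot : (PySem.List.pyRange (W - l - 2) (l - 1) (-1)).map
      ((fun xy => PySem.List.pyGetD (PySem.List.pyGetD grid xy.2 []) xy.1 0) ∘ (fun xv => (xv, H - l - 1)))
      = (PySem.List.slice (PySem.List.pyGetD grid (H - l - 1) []) (some l) (some (W - l - 1))).reverse := by
    rw [pyRange_neg_one, show (l - 1 + 1 : Int) = l from by ring,
      show (W - l - 2 + 1 : Int) = W - l - 1 from by ring, List.map_reverse]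
    rw [show ((fun xy => PySem.List.pyGetD (PySem.List.pyGetD grid xy.2 []) xy.1 0) ∘ (fun xv => (xv, H - l - 1)))
        = fun x => PySem.List.pyGetD (PySem.List.pyGetD grid (H - l - 1) []) x 0 from rfl]
    rw [sliceRange _ l (W - l - 1) hl (by omega)
      (le_trans (by omega) (hrowlen (H - l - 1) (by omega) (by omega)))]
  rw [htop, hbot]
  rfl

-- A equals the slice-form layer list
theorem A_eq (grid : List (List Int))
    (hrow : ∀ row ∈ grid, (PySem.List.pyGetD grid 0 []).length ≤ row.length) :
    layers_from grid = (List.range (pvT grid)).map (fun (l : Nat) => pvRing grid (l : Int)) := by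
  simp only [layers_from]
  have hT : PySem.Int.floordiv (min ((PySem.List.pyGetD grid 0 []).length : Int) (grid.length : Int)) 2
      = ((pvT grid : Nat) : Int) := by
    unfold pvT
    rw [← Nat.cast_min]
    exact PySem.Int.floordiv_natCast _ 2
  rw [hT, PySem.List.pyRange_zero_natCast, List.map_map]
  apply List.map_congr_left
  intro k hk
  have hkT : k < pvT grid := List.mem_range.mp hk
  have hb : 2 * (k : Int) + 2 ≤ pvW grid ∧ 2 * (k : Int) + 2 ≤ pvH grid := by
    unfold pvT at hkT
    unfold pvW pvH
    omega
  simpa using layer_eq grid (k : Int) (by positivity) hb.1 hb.2 hrow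

-- the middle slice xs[1:len-1] as drop/take
theorem slice_mid {α : Type} (xs : List α) (h2 : 2 ≤ xs.length) :
    PySem.List.slice xs (some 1) (some ((xs.length : Int) - 1))
      = (xs.drop 1).take (xs.length - 2) := by
  have h1 : ((xs.length : Int) - 1) = (((xs.length - 1 : Nat)) : Int) := by omega
  rw [h1, show (1 : Int) = (((1 : Nat)) : Int) from rfl, PySem.List.slice_natCast]
  congr 1

theorem pyGetD_mem (g : List (List Int)) (j : Int) (hj0 : 0 ≤ j) (hj : j < (g.length : Int)) :
    PySem.List.pyGetD g j [] ∈ g := by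
  rw [PySem.List.pyGetD_eq_getElem g [] hj0 (by exact_mod_cast hj)]
  exact List.getElem_mem _

-- length of a row slice row[1:w-1]
theorem slice_w_len (row : List Int) (w : Int) (h2 : 2 ≤ w) (hw : w ≤ (row.length : Int)) :
    ((PySem.List.slice row (some 1) (some (w - 1))).length : Int) = w - 2 := by
  rw [PySem.List.length_slice]
  have c1 : PySem.List.clampIdx row.length 1 = 1 := by
    simp only [PySem.List.clampIdx]; split_ifs <;> omega
  have c2 : PySem.List.clampIdx row.length (w - 1) = (w - 1).toNat := by
    simp only [PySem.List.clampIdx]; split_ifs <;> omega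
  rw [c1, c2]
  omega

-- indexing into a row slice row[1:w-1]
theorem inner_get (row : List Int) (w x : Int) (hw : w ≤ (row.length : Int))
    (hx0 : 0 ≤ x) (hx : x < w - 2) :
    PySem.List.pyGetD (PySem.List.slice row (some 1) (some (w - 1))) x 0
      = PySem.List.pyGetD row (x + 1) 0 := by
  have hs : PySem.List.slice row (some 1) (some (w - 1))
      = (row.drop 1).take (w.toNat - 1 - 1) := by
    have h1 : ((w : Int) - 1) = (((w.toNat - 1 : Nat)) : Int) := by omega
    rw [h1, show (1 : Int) = (((1 : Nat)) : Int) from rfl, PySem.List.slice_natCast]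
  rw [hs]
  rw [PySem.List.pyGetD_eq_getElem _ 0 hx0 (by
      simp only [List.length_take, List.length_drop]; omega),
    PySem.List.pyGetD_eq_getElem row 0 (by omega) (by omega)]
  rw [List.getElem_take, List.getElem_drop]
  congr 1
  omega

-- facts about the inner subgrid
theorem inner_len (g : List (List Int)) (h2 : 2 ≤ g.length) :
    (pvInner g).length = g.length - 2 := by
  unfold pvInner pvH
  rw [slice_mid g h2]
  simp only [List.length_map, List.length_take, List.length_drop]
  omega

theorem inner_row (g : List (List Int)) (y : Int) (h2 : 2 ≤ g.length)
    (hy0 : 0 ≤ y) (hy : y < pvH g - 2) :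
    PySem.List.pyGetD (pvInner g) y []
      = PySem.List.slice (PySem.List.pyGetD g (y + 1) []) (some 1) (some (pvW g - 1)) := by
  unfold pvH at hy
  have hI : pvInner g
      = ((g.drop 1).take (g.length - 2)).map
          (fun row => PySem.List.slice row (some 1) (some (pvW g - 1))) := by
    unfold pvInner pvH
    rw [slice_mid g h2]
  rw [hI]
  rw [PySem.List.pyGetD_eq_getElem _ [] hy0 (by
      simp only [List.length_map, List.length_take, List.length_drop]; omega)]
  simp only [List.getElem_map, List.getElem_take, List.getElem_drop]
  rw [PySem.List.pyGetD_eq_getElem g [] (by omega) (by omega)]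
  congr 2
  omega

-- slicing a middle row slice shifts the bounds by one
theorem shiftSeg (row : List Int) (w a b : Int) (h0 : 0 ≤ a) (hab : a ≤ b) (hb : b ≤ w - 2)
    (hw : w ≤ (row.length : Int)) :
    PySem.List.slice (PySem.List.slice row (some 1) (some (w - 1))) (some a) (some b)
      = PySem.List.slice row (some (a + 1)) (some (b + 1)) := by
  have hw2 : 2 ≤ w := by omega
  rw [← sliceRange _ a b h0 hab (by rw [slice_w_len row w hw2 hw]; omega)]
  rw [← sliceRange row (a + 1) (b + 1) (by omega) (by omega) (by omega)]
  rw [pyRange_shift a b, List.map_map]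
  apply List.map_congr_left
  intro x hx
  obtain ⟨hx1, hx2⟩ := PySem.List.mem_pyRange_one.mp hx
  simp only [Function.comp_apply]
  exact inner_get row w x hw (by omega) (by omega)

-- width and row lengths of the inner subgrid
theorem inner_W (g : List (List Int)) (h3 : 3 ≤ g.length)
    (hw2 : 2 ≤ (PySem.List.pyGetD g 0 []).length)
    (hrow : ∀ row ∈ g, (PySem.List.pyGetD g 0 []).length ≤ row.length) :
    pvW (pvInner g) = pvW g - 2 := by
  have hrow1 : (pvW g) ≤ ((PySem.List.pyGetD g 1 []).length : Int) := by
    unfold pvW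
    exact_mod_cast hrow _ (pyGetD_mem g 1 (by omega) (by exact_mod_cast h3 |>.trans_lt' (by omega)))
  have h := inner_row g 0 (by omega) (by omega) (by unfold pvH; omega)
  unfold pvW at *
  rw [show ((0 : Int) + 1) = 1 from by ring] at h
  rw [h]
  exact_mod_cast slice_w_len _ _ (by exact_mod_cast hw2) hrow1

theorem rowlen (g : List (List Int))
    (hrow : ∀ row ∈ g, (PySem.List.pyGetD g 0 []).length ≤ row.length)
    (j : Int) (hj0 : 0 ≤ j) (hj : j < pvH g) :
    pvW g ≤ ((PySem.List.pyGetD g j []).length : Int) := by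
  unfold pvW
  unfold pvH at hj
  rw [PySem.List.pyGetD_eq_getElem g [] hj0 (by exact_mod_cast hj)]
  exact_mod_cast hrow _ (List.getElem_mem _)

-- every row of the inner subgrid is as long as its first row
theorem inner_hrow (g : List (List Int)) (h2 : 2 ≤ g.length)
    (hw2 : 2 ≤ (PySem.List.pyGetD g 0 []).length)
    (hrow : ∀ row ∈ g, (PySem.List.pyGetD g 0 []).length ≤ row.length) :
    ∀ row ∈ pvInner g, (PySem.List.pyGetD (pvInner g) 0 []).length ≤ row.length := by
  intro row hr
  by_cases h3 : 3 ≤ g.length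
  · have hWv : pvW (pvInner g) = pvW g - 2 := inner_W g h3 hw2 hrow
    unfold pvInner at hr
    obtain ⟨row', hr', rfl⟩ := List.mem_map.mp hr
    have hmem : row' ∈ g := PySem.List.mem_of_mem_slice g _ _ hr'
    have hlen : pvW g ≤ ((row'.length : Nat) : Int) := by
      unfold pvW; exact_mod_cast hrow _ hmem
    have hsl : ((PySem.List.slice row' (some 1) (some (pvW g - 1))).length : Int)
        = pvW g - 2 := slice_w_len row' (pvW g) (by unfold pvW; exact_mod_cast hw2) hlen
    have e1 : pvW (pvInner g) = ((PySem.List.pyGetD (pvInner g) 0 []).length : Int) := rfl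
    have e2 : pvW g = ((PySem.List.pyGetD g 0 []).length : Int) := rfl
    omega
  · have : (pvInner g).length = 0 := by rw [inner_len g h2]; omega
    rw [List.length_eq_zero_iff.mp this] at hr
    simp at hr

theorem T_inner (g : List (List Int)) (h2 : 2 ≤ g.length)
    (hw2 : 2 ≤ (PySem.List.pyGetD g 0 []).length)
    (hrow : ∀ row ∈ g, (PySem.List.pyGetD g 0 []).length ≤ row.length) :
    pvT (pvInner g) = pvT g - 1 := by
  by_cases h3 : 3 ≤ g.length
  · have hWv : pvW (pvInner g) = pvW g - 2 := inner_W g h3 hw2 hrow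
    have hHv : (pvInner g).length = g.length - 2 := inner_len g h2
    unfold pvT
    unfold pvW at hWv
    rw [hHv]
    omega
  · have hnil : pvInner g = [] :=
      List.length_eq_zero_iff.mp (by rw [inner_len g h2]; omega)
    have hg2 : g.length = 2 := by omega
    have e : PySem.List.pyGetD (([]) : List (List Int)) 0 ([] : List Int) = [] := rfl
    unfold pvT
    rw [hnil, e]
    simp only [List.length_nil]
    omega

-- ring_shift: ring l of the inner subgrid is ring l+1 of the grid
theorem ring_shift (g : List (List Int)) (l : Int) (hl : 0 ≤ l)
    (hW : 2 * l + 4 ≤ pvW g) (hH : 2 * l + 4 ≤ pvH g)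
    (hrow : ∀ row ∈ g, (PySem.List.pyGetD g 0 []).length ≤ row.length) :
    pvRing (pvInner g) l = pvRing g (l + 1) := by
  have h2 : 2 ≤ g.length := by unfold pvH at hH; omega
  have hWv : pvW (pvInner g) = pvW g - 2 :=
    inner_W g (by unfold pvH at hH; omega) (by unfold pvW at hW; omega) hrow
  have hHv : pvH (pvInner g) = pvH g - 2 := by
    show ((pvInner g).length : Int) = pvH g - 2
    rw [inner_len g h2]
    unfold pvH at hH ⊢
    omega
  have hrl := rowlen g hrow
  unfold pvRing
  rw [hWv, hHv]
  have htop : PySem.List.slice (PySem.List.pyGetD (pvInner g) l []) (some l)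
        (some (pvW g - 2 - l))
      = PySem.List.slice (PySem.List.pyGetD g (l + 1) []) (some (l + 1))
        (some (pvW g - (l + 1))) := by
    rw [inner_row g l h2 hl (by omega),
      shiftSeg _ (pvW g) l (pvW g - 2 - l) hl (by omega) (by omega)
        (hrl (l + 1) (by omega) (by omega)),
      show pvW g - 2 - l + 1 = pvW g - (l + 1) from by ring]
  have hright : (PySem.List.pyRange (l + 1) (pvH g - 2 - l) 1).map
        (fun y => PySem.List.pyGetD (PySem.List.pyGetD (pvInner g) y [])
          (pvW g - 2 - l - 1) 0)
      = (PySem.List.pyRange (l + 1 + 1) (pvH g - (l + 1)) 1).map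
        (fun y => PySem.List.pyGetD (PySem.List.pyGetD g y [])
          (pvW g - (l + 1) - 1) 0) := by
    rw [show pvH g - (l + 1) = (pvH g - 2 - l) + 1 from by ring,
      pyRange_shift (l + 1) (pvH g - 2 - l), List.map_map]
    apply List.map_congr_left
    intro y hy
    obtain ⟨hy1, hy2⟩ := PySem.List.mem_pyRange_one.mp hy
    simp only [Function.comp_apply]
    rw [inner_row g y h2 (by omega) (by omega),
      inner_get _ (pvW g) _ (hrl (y + 1) (by omega) (by omega)) (by omega) (by omega),
      show pvW g - 2 - l - 1 + 1 = pvW g - (l + 1) - 1 from by ring]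
  have hbot : (PySem.List.slice (PySem.List.pyGetD (pvInner g) (pvH g - 2 - l - 1) [])
        (some l) (some (pvW g - 2 - l - 1))).reverse
      = (PySem.List.slice (PySem.List.pyGetD g (pvH g - (l + 1) - 1) [])
        (some (l + 1)) (some (pvW g - (l + 1) - 1))).reverse := by
    rw [inner_row g (pvH g - 2 - l - 1) h2 (by omega) (by omega),
      shiftSeg _ (pvW g) l (pvW g - 2 - l - 1) hl (by omega) (by omega)
        (hrl (pvH g - 2 - l - 1 + 1) (by omega) (by omega)),
      show pvH g - 2 - l - 1 + 1 = pvH g - (l + 1) - 1 from by ring,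
      show pvW g - 2 - l - 1 + 1 = pvW g - (l + 1) - 1 from by ring]
  have hleft : (PySem.List.pyRange (pvH g - 2 - l - 2) l (-1)).map
        (fun y => PySem.List.pyGetD (PySem.List.pyGetD (pvInner g) y []) l 0)
      = (PySem.List.pyRange (pvH g - (l + 1) - 2) (l + 1) (-1)).map
        (fun y => PySem.List.pyGetD (PySem.List.pyGetD g y []) (l + 1) 0) := by
    rw [pyRange_neg_one (pvH g - 2 - l - 2) l,
      pyRange_neg_one (pvH g - (l + 1) - 2) (l + 1),
      show pvH g - (l + 1) - 2 + 1 = (pvH g - 2 - l - 2 + 1) + 1 from by ring,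
      show (l + 1) + 1 = (l + 1) + 1 from rfl,
      pyRange_shift (l + 1) (pvH g - 2 - l - 2 + 1),
      List.map_reverse, List.map_reverse, List.map_map]
    congr 1
    apply List.map_congr_left
    intro y hy
    obtain ⟨hy1, hy2⟩ := PySem.List.mem_pyRange_one.mp hy
    simp only [Function.comp_apply]
    rw [inner_row g y h2 (by omega) (by omega),
      inner_get _ (pvW g) _ (hrl (y + 1) (by omega) (by omega)) (by omega) (by omega)]
  rw [htop, hright, hbot, hleft]

-- ring 0 is the peeled border B yields
theorem ring_zero (g : List (List Int)) :
    pvRing g 0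
      = PySem.List.slice (PySem.List.pyGetD g 0 []) none (some (pvW g))
        ++ (PySem.List.pyRange 1 (pvH g) 1).map
            (fun y => PySem.List.pyGetD (PySem.List.pyGetD g y []) (pvW g - 1) 0)
        ++ (PySem.List.slice (PySem.List.pyGetD g (pvH g - 1) []) none (some (pvW g - 1))).reverse
        ++ (PySem.List.pyRange (pvH g - 2) 0 (-1)).map
            (fun y => PySem.List.pyGetD (PySem.List.pyGetD g y []) 0 0) := by
  unfold pvRing
  norm_num [PySem.List.slice_zero_start]

-- B equals the slice-form layer list (induction on a length bound)
theorem B_eq_aux : ∀ (N : Nat) (g : List (List Int)), g.length ≤ N →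
    (∀ row ∈ g, (PySem.List.pyGetD g 0 []).length ≤ row.length) →
    layers_from_alt g = (List.range (pvT g)).map (fun (l : Nat) => pvRing g (l : Int)) := by
  intro N
  induction N with
  | zero =>
    intro g hlen _
    have hnil : g = [] := List.length_eq_zero_iff.mp (by omega)
    subst hnil
    rw [layers_from_alt]
    simp [pvT]
  | succ N ih =>
    intro g hlen hrow
    rw [layers_from_alt]
    by_cases hg : g.length < 2 ∨ (PySem.List.pyGetD g 0 []).length < 2
    · rw [dif_pos hg]
      have hT0 : pvT g = 0 := by unfold pvT; omega
      rw [hT0]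
      rfl
    · rw [dif_neg hg]
      push Not at hg
      obtain ⟨h2, hw2⟩ := hg
      show (PySem.List.slice (PySem.List.pyGetD g 0 []) none (some (pvW g))
          ++ (PySem.List.pyRange 1 (pvH g) 1).map
              (fun y => PySem.List.pyGetD (PySem.List.pyGetD g y []) (pvW g - 1) 0)
          ++ (PySem.List.slice (PySem.List.pyGetD g (pvH g - 1) []) none (some (pvW g - 1))).reverse
          ++ (PySem.List.pyRange (pvH g - 2) 0 (-1)).map
              (fun y => PySem.List.pyGetD (PySem.List.pyGetD g y []) 0 0))
          :: layers_from_alt (pvInner g)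
        = (List.range (pvT g)).map (fun (l : Nat) => pvRing g (l : Int))
      rw [ih (pvInner g) (by rw [inner_len g h2]; omega) (inner_hrow g h2 hw2 hrow)]
      rw [T_inner g h2 hw2 hrow, ← ring_zero g]
      have htt : pvT g = (pvT g - 1) + 1 := by unfold pvT; omega
      set t := pvT g - 1 with hdef
      rw [htt, List.range_succ_eq_map, List.map_cons, List.map_map]
      refine congrArg₂ List.cons ?_ ?_
      · norm_num
      · apply List.map_congr_left
        intro k hk
        have hkt : k < t := List.mem_range.mp hk
        have hb : 2 * (k : Int) + 4 ≤ pvW g ∧ 2 * (k : Int) + 4 ≤ pvH g := by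
          unfold pvT at htt hdef
          unfold pvW pvH
          omega
        have := ring_shift g (k : Int) (by positivity) hb.1 hb.2 hrow
        simp only [Function.comp_apply]
        rw [this]
        norm_num

theorem B_eq (g : List (List Int))
    (hrow : ∀ row ∈ g, (PySem.List.pyGetD g 0 []).length ≤ row.length) :
    layers_from_alt g = (List.range (pvT g)).map (fun (l : Nat) => pvRing g (l : Int)) :=
  B_eq_aux g.length g le_rfl hrow

-- ===== VERDICT (by name: the statement is the Claim_ definition above) =====
theorem layers_from_spec : Claim_equal_layers_from := by
  intro grid _ hpre
  obtain ⟨hne, hdisj⟩ := hpre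
  show layers_from grid = layers_from_alt grid
  have hT : PySem.Int.floordiv
      (min ((PySem.List.pyGetD grid 0 []).length : Int) (grid.length : Int)) 2
      = ((pvT grid : Nat) : Int) := by
    unfold pvT
    rw [← Nat.cast_min]
    exact PySem.Int.floordiv_natCast _ 2
  by_cases h0 : pvT grid = 0
  · have hA : layers_from grid = [] := by
      simp only [layers_from]
      rw [hT, h0, PySem.List.pyRange_zero_natCast]
      rfl
    have hB : layers_from_alt grid = [] := by
      rw [layers_from_alt, dif_pos (by unfold pvT at h0; omega)]
    rw [hA, hB]
  · have hrow : ∀ row ∈ grid, (PySem.List.pyGetD grid 0 []).length ≤ row.length := by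
      rcases hdisj with hd | hd
      · exfalso
        rw [hT] at hd
        exact h0 (by exact_mod_cast hd)
      · exact hd
    rw [A_eq grid hrow, B_eq grid hrow]
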